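-- pv_equiv track=rewrite | github.com/abdullaabdullazade/rio-semifinal-submissions-2025 | Nuru_Vəlizadə_Bəhruz oğlu_11.0_1_70BAL_RIO2025_Semifinal_S4.py | solve
-- ===== SOURCE A (Python) =====
-- import heapq
--
-- def solve(n, k, skills):
--     sorted_skills = [sorted(team) for team in skills]
--     indices = [0] * n
--     min_diff = float('inf')
--     heap = []
--     current_max = max(team[0] for team in sorted_skills)
--
--     for i in range(n):
--         heapq.heappush(heap, (sorted_skills[i][0], i))
--
--     while True:
--         current_min, team_idx = heapq.heappop(heap)
--         min_diff = min(min_diff, current_max - current_min)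
--
--         indices[team_idx] += 1
--
--         if indices[team_idx] == k:
--             break
--
--         next_skill = sorted_skills[team_idx][indices[team_idx]]
--         heapq.heappush(heap, (next_skill, team_idx))
--         current_max = max(current_max, next_skill)
--
--     return min_diff
-- ===== SOURCE B (Python) =====
-- def solve(n, k, skills):
--     # flatten the k smallest skills of each team into one value-sorted list,
--     # then sweep it backwards keeping, per team, the nearest value at or after
--     # the current position; whenever every team is represented, the window
--     # [current value, max over teams] is a candidate range.
--     pairs = sorted(((v, t) for t in range(n) for v in sorted(skills[t])[:k]),
--                    key=lambda p: p[0])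
--     seen = [None] * n
--     missing = n
--     best = None
--     for v, t in reversed(pairs):
--         if seen[t] is None:
--             missing -= 1
--         seen[t] = v
--         if missing == 0:
--             d = max(seen) - v
--             if best is None or d < best:
--                 best = d
--     return best if best is not None else float('inf')
-- ===== Notes on version B (the rewrite author's own statement) =====
-- stated objective: alternative
-- what changed: A simulates a heap of per-team cursors with an incrementally maintained running maximum; B flattens the k smallest skills of every team into one value-sorted list and does a single backward sweep over it, keeping per team the nearest value at or after the cursor and taking max(seen)-current as a candidate whenever all teams are represented.
-- outside the precondition, e.g. on solve(1, 1, [[5], [100]]): A returns 95, B returns 0; on solve(2, 2, [[5, 6], [1]]): A raises IndexError, B returns 4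
import Mathlib
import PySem

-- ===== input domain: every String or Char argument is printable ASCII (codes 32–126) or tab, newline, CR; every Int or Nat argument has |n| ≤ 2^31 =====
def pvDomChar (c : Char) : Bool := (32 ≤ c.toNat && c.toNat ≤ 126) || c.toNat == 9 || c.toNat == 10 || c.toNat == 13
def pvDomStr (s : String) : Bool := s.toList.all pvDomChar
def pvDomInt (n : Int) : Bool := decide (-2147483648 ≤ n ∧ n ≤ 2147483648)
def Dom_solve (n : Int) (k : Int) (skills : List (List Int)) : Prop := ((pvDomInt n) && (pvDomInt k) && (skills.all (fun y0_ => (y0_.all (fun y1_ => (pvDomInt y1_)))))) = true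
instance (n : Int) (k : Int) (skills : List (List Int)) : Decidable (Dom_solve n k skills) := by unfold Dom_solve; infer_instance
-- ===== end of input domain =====

-- B replaces A's heap simulation by one global sort of all (value, team) pairs and a
-- single backward sweep that keeps, per team, the nearest value at or after the cursor
-- (objective: alternative algorithm, similar cost; return value only — neither mutates).

-- ===== PORT A =====
-- heapq is modelled by its specification: the heap holds the multiset of pushed pairs
-- and heappop removes the lexicographically smallest pair (Python's tuple order);
-- this is exact for heapq over (int, int) tuples.
def pvLexLe (a b : Int × Int) : Bool := a.1 < b.1 || (a.1 == b.1 && a.2 ≤ b.2)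

def pvPopMin : List (Int × Int) → Option ((Int × Int) × List (Int × Int))
  | [] => none
  | p :: rest =>
    match pvPopMin rest with
    | none => some (p, [])
    | some (q, rest') => if pvLexLe p q then some (p, rest) else some (q, p :: rest')

-- the 'while True' loop of A; fuel only makes the recursion structural (it is never
-- exhausted on inputs where the Python loop terminates, see pvFuel_sufficient below)
def pvSolveLoop (ss : List (List Int)) (k : Int) :
    Nat → List (Int × Int) → List Int → Option Int → Int → Int
  | 0, _, _, md, _ => md.getD 0                 -- unreachable under Pre_
  | fuel+1, heap, indices, md, curMax =>
    match pvPopMin heap with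
    | none => md.getD 0                         -- heappop([]): IndexError, excluded by Pre_
    | some ((cmin, ti), rest) =>
      let d := curMax - cmin
      let md' : Option Int := some (match md with | none => d | some m => min m d)
      let idx := (PySem.List.pyGet? indices ti).getD 0 + 1
      let indices' := indices.set ti.toNat idx  -- ti comes from range(n): a valid index
      if idx == k then md'.getD 0               -- min_diff is an int here (loop ran)
      else
        match (PySem.List.pyGet? ss ti).bind (fun team => PySem.List.pyGet? team idx) with
        | none => md'.getD 0                    -- IndexError in Python, excluded by Pre_
        | some nxt => pvSolveLoop ss k fuel (rest ++ [(nxt, ti)]) indices' md' (max curMax nxt)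

def solve (n : Int) (k : Int) (skills : List (List Int)) : Int :=
  let ss := skills.map (fun team => PySem.List.sorted team (fun v => v) false)
  -- max(team[0] for team in sorted_skills); the .getD 0 is unreachable under Pre_
  -- (an empty team raises IndexError, empty skills raises ValueError)
  match PySem.List.max? (ss.map (fun team => (PySem.List.pyGet? team 0).getD 0)) (fun v => v) with
  | none => 0
  | some cm =>
      let heap := (PySem.List.pyRange 0 n 1).map (fun i =>
        (((PySem.List.pyGet? ss i).bind (fun team => PySem.List.pyGet? team 0)).getD 0, i))
      pvSolveLoop ss k (n.toNat * k.toNat + 1) heap (List.replicate n.toNat 0) none cm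

-- ===== PORT B =====
-- max(seen): guarded by missing == 0, so every entry is set when it is evaluated
def pvMaxSeen (seen : List (Option Int)) : Int :=
  match PySem.List.max? (seen.filterMap (fun x => x)) (fun v => v) with
  | some m => m
  | none => 0

def pvSweep : List (Int × Int) → List (Option Int) → Int → Option Int → Option Int
  | [], _, _, best => best
  | (v, t) :: rest, seen, missing, best =>
    let cur := (PySem.List.pyGet? seen t).getD none
    let missing' := if cur.isNone then missing - 1 else missing
    let seen' := seen.set t.toNat (some v)      -- t comes from range(n): a valid index
    let best' := if missing' == 0 then
        let d := pvMaxSeen seen' - v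
        match best with
        | none => some d
        | some b => some (if d < b then d else b)
      else best
    pvSweep rest seen' missing' best'

def solve_alt (n : Int) (k : Int) (skills : List (List Int)) : Int :=
  let pairs := PySem.List.sorted
      ((PySem.List.pyRange 0 n 1).flatMap (fun t =>
        (PySem.List.slice
            (PySem.List.sorted ((PySem.List.pyGet? skills t).getD []) (fun v => v) false)
            none (some k)).map (fun v => (v, t))))
      (fun p => p.1) false
  match pvSweep pairs.reverse (List.replicate n.toNat none) n none with
  | some best => best
  | none => 0   -- Python B returns float('inf') here; unreachable under Pre_

-- ===== PRECONDITION & SPEC =====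
def pvTeamMin (team : List Int) : Int := team.foldl min (team.headD 0)
def pvTeamMax (team : List Int) : Int := team.foldl max (team.headD 0)
-- the k-th smallest skill of a team (1-based)
def pvKth (team : List Int) (k : Int) : Int :=
  (PySem.List.sorted team (fun v => v) false).getD (k.toNat - 1) 0
-- the largest of the first n teams' minima (A's initial current_max when no surplus team exceeds it)
def pvBaseMax (n : Int) (skills : List (List Int)) : Int :=
  ((List.range n.toNat).map (fun t => pvTeamMin (skills.getD t []))).foldl max
    (pvTeamMin (skills.getD 0 []))

-- Pre_solve is exactly the inputs where A terminates normally, except that it also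
-- excludes inputs whose surplus teams (index ≥ n — malformed input, n is the number of
-- teams) have a minimum larger than every real team's minimum: there A seeds its running
-- maximum from a team that is not part of the problem, a corner no caller would specify.
-- Clause 5 (k-th smallest of some full team precedes, in (value, index) order, the
-- maximum of every team shorter than k) is exactly A's loop breaking before it runs off
-- the end of a short team.
def Pre_solve (n : Int) (k : Int) (skills : List (List Int)) : Prop :=
  1 ≤ n ∧ 1 ≤ k ∧ n ≤ (skills.length : Int) ∧
  (∀ team ∈ skills, team ≠ []) ∧
  (∀ t, t < skills.length → n.toNat ≤ t → pvTeamMin (skills.getD t []) ≤ pvBaseMax n skills) ∧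
  (∃ u, u < n.toNat ∧ k ≤ ((skills.getD u []).length : Int)) ∧
  (∀ t, t < n.toNat → ((skills.getD t []).length : Int) < k →
    ∃ u, u < n.toNat ∧ k ≤ ((skills.getD u []).length : Int) ∧
      (pvKth (skills.getD u []) k < pvTeamMax (skills.getD t []) ∨
       (pvKth (skills.getD u []) k = pvTeamMax (skills.getD t []) ∧ u < t)))
instance (n : Int) (k : Int) (skills : List (List Int)) : Decidable (Pre_solve n k skills) := by
  unfold Pre_solve; infer_instance

def pvWitness_solve : Int × Int × List (List Int) := (2, 2, [[3, 1], [4, 4]])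

def Spec_solve (n : Int) (k : Int) (skills : List (List Int)) (out : Int) : Prop := out = solve_alt n k skills
instance (n : Int) (k : Int) (skills : List (List Int)) (out : Int) : Decidable (Spec_solve n k skills out) := by unfold Spec_solve; infer_instance

-- ===== CLAIM (what is proved, stated in full; the proofs are below) =====
def Claim_equal_solve : Prop := ∀ (n : Int) (k : Int) (skills : List (List Int)), Dom_solve n k skills → Pre_solve n k skills → Spec_solve n k skills (solve n k skills)

-- ===== LEMMAS AND PROOFS =====

def pvProp (a b : Int × Int) : Prop := a.1 < b.1 ∨ (a.1 = b.1 ∧ a.2 ≤ b.2)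

lemma pvProp_antisymm {a b : Int × Int} (h1 : pvProp a b) (h2 : pvProp b a) : a = b := by
  unfold pvProp at *; obtain ⟨x, y⟩ := a; obtain ⟨u, v⟩ := b; simp_all; omega

lemma pvInsertBy_lex (x : Int × Int) :
    ∀ (acc : List (Int × Int)), acc.Pairwise pvProp →
    (∀ a ∈ acc, a.1 = x.1 → a.2 ≤ x.2) →
    (PySem.List.insertBy (fun a b => decide (a.1 < b.1)) x acc).Pairwise pvProp
  | [], _, _ => by simp [PySem.List.insertBy]
  | y :: ys, hacc, hx => by
    rw [show PySem.List.insertBy (fun a b => decide (a.1 < b.1)) x (y :: ys)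
        = if x.1 < y.1 then x :: y :: ys else y :: PySem.List.insertBy (fun a b => decide (a.1 < b.1)) x ys by
      simp [PySem.List.insertBy]]
    split_ifs with hlt
    · constructor
      · intro z hz
        rcases List.mem_cons.mp hz with rfl | hz
        · exact Or.inl hlt
        · have := (List.pairwise_cons.mp hacc).1 z hz
          unfold pvProp at *; rcases this with h | h
          · exact Or.inl (by omega)
          · exact Or.inl (by omega)
      · exact hacc
    · constructor
      · intro z hz
        rcases (PySem.List.mem_insertBy _ _ _ _).mp hz with rfl | hz
        · -- pvProp y x from ¬ x.1 < y.1
          unfold pvProp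
          rcases eq_or_lt_of_le (not_lt.mp hlt) with h | h
          · exact Or.inr ⟨h, hx y (by simp) h⟩
          · exact Or.inl h
        · exact (List.pairwise_cons.mp hacc).1 z hz
      · exact pvInsertBy_lex x ys (List.pairwise_cons.mp hacc).2
          (fun a ha => hx a (List.mem_cons_of_mem _ ha))

lemma pvSorted_fst_lex (xs : List (Int × Int))
    (hxs : xs.Pairwise (fun a b => a.1 = b.1 → a.2 ≤ b.2)) :
    (PySem.List.sorted xs (fun p => p.1) false).Pairwise pvProp := by
  rw [PySem.List.sorted_eq_foldl_insertBy]
  suffices h : ∀ (l acc : List (Int × Int)), acc.Pairwise pvProp →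
      (∀ a ∈ acc, ∀ x ∈ l, a.1 = x.1 → a.2 ≤ x.2) →
      l.Pairwise (fun a b => a.1 = b.1 → a.2 ≤ b.2) →
      (l.foldl (fun acc x => PySem.List.insertBy (fun a b => decide ((fun p : Int × Int => p.1) a < (fun p : Int × Int => p.1) b)) x acc) acc).Pairwise pvProp by
    exact h xs [] (by simp) (by simp) hxs
  intro l
  induction l with
  | nil => intro acc h _ _; simpa using h
  | cons x rest ih =>
    intro acc hacc hcross hl
    simp only [List.foldl_cons]
    apply ih
    · exact pvInsertBy_lex x acc hacc (fun a ha h => hcross a ha x (by simp) h)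
    · intro a ha y hy heq
      rcases (PySem.List.mem_insertBy _ _ _ _).mp ha with rfl | ha
      · exact (List.pairwise_cons.mp hl).1 y hy heq
      · exact hcross a ha y (List.mem_cons_of_mem _ hy) heq
    · exact (List.pairwise_cons.mp hl).2

-- ===== core objects: the merged value-sorted pair list and per-team cursors =====
def pvFlat (ts : List (List Int)) : List (Int × Int) :=
  (List.range ts.length).flatMap (fun t => (ts.getD t []).map (fun v => (v, (t : Int))))
def pvP (ts : List (List Int)) : List (Int × Int) :=
  PySem.List.sorted (pvFlat ts) (fun p => p.1) false
def pvCnt (ts : List (List Int)) (t l : Nat) : Nat :=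
  (((pvP ts).take l).filter (fun p => p.2 == (t : Int))).length
def pvLen (ts : List (List Int)) (t : Nat) : Nat := (ts.getD t []).length
def pvPtr (ts : List (List Int)) (t l : Nat) : Int := (ts.getD t []).getD (pvCnt ts t l) 0

-- teams are sorted lists
def pvTS (ts : List (List Int)) : Prop := ∀ team ∈ ts, team.Pairwise (· ≤ ·)

lemma pvFlat_eqTag (ts : List (List Int)) :
    (pvFlat ts).Pairwise (fun a b => a.1 = b.1 → a.2 ≤ b.2) := by
  unfold pvFlat
  rw [List.pairwise_flatMap]
  refine ⟨fun t _ => ?_, ?_⟩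
  · rw [List.pairwise_map]
    have : ∀ (xs : List Int), xs.Pairwise (fun (_ _ : Int) => True) := by
      intro xs; induction xs with
      | nil => simp
      | cons x r ih => exact List.Pairwise.cons (fun _ _ => trivial) ih
    exact (this _).imp (fun _ => by simp)
  · rw [List.pairwise_iff_getElem]
    intro i j hi hj hij
    simp only [List.getElem_range]
    intro x hx y hy _
    simp only [List.mem_map] at hx hy
    obtain ⟨vx, -, rfl⟩ := hx; obtain ⟨vy, -, rfl⟩ := hy
    simp only []
    exact_mod_cast Int.ofNat_le.mpr (le_of_lt hij)

lemma pvP_perm (ts : List (List Int)) : (pvP ts).Perm (pvFlat ts) :=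
  PySem.List.sorted_perm _ _ _

lemma pvP_lex (ts : List (List Int)) : (pvP ts).Pairwise pvProp :=
  pvSorted_fst_lex _ (pvFlat_eqTag ts)

lemma pvFlatMap_single {α : Type} (f : Nat → List α) (N t : Nat) (ht : t < N)
    (h0 : ∀ u, u < N → u ≠ t → f u = []) : (List.range N).flatMap f = f t := by
  induction N with
  | zero => omega
  | succ m ih =>
    rw [List.range_succ, List.flatMap_append]
    rcases Nat.lt_or_ge t m with h | h
    · rw [ih h (fun u hu hne => h0 u (Nat.lt_succ_of_lt hu) hne)]
      simp [h0 m (Nat.lt_succ_self m) (by omega)]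
    · have : t = m := by omega
      subst this
      have : (List.range t).flatMap f = [] := by
        apply List.flatMap_eq_nil_iff.mpr
        intro u hu; exact h0 u (Nat.lt_succ_of_lt (List.mem_range.mp hu)) (by have := List.mem_range.mp hu; omega)
      simp [this]

lemma pvProp_of_le_tag {t : Int} (a b : Int × Int) (ha : a.2 = t) (hb : b.2 = t)
    (h : a.1 ≤ b.1) : pvProp a b := by
  unfold pvProp; rcases lt_or_eq_of_le h with h | h
  · exact Or.inl h
  · exact Or.inr ⟨h, by rw [ha, hb]⟩

-- the elements of team t appear in pvP in their per-team (sorted) order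
lemma pvP_filter (ts : List (List Int)) (hs : pvTS ts) (t : Nat) (ht : t < ts.length) :
    (pvP ts).filter (fun p => p.2 == (t : Int)) = (ts.getD t []).map (fun v => (v, (t : Int))) := by
  have hteam : (ts.getD t []).Pairwise (· ≤ ·) := by
    apply hs
    rw [List.getD_eq_getElem?_getD, List.getElem?_eq_getElem ht]
    exact List.getElem_mem ht
  -- right-hand side: the filter of the flattened list
  have hflat : (pvFlat ts).filter (fun p => p.2 == (t : Int)) = (ts.getD t []).map (fun v => (v, (t : Int))) := by
    unfold pvFlat
    rw [List.filter_flatMap]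
    rw [pvFlatMap_single (f := fun u => List.filter (fun p : Int × Int => p.2 == (t:Int)) ((ts.getD u []).map (fun v => (v, (u : Int))))) ts.length t ht]
    · rw [List.filter_map]
      have he : ((fun p : Int × Int => p.2 == (t:Int)) ∘ (fun v => (v, (t : Int)))) = fun _ => true := by
        funext v; simp
      rw [he, List.filter_true]
    · intro u hu hne
      rw [List.filter_map]
      have he : ((fun p : Int × Int => p.2 == (t:Int)) ∘ (fun v => (v, (u : Int)))) = fun _ => false := by
        funext v
        simp only [Function.comp_apply]
        rw [beq_eq_false_iff_ne]
        intro hc; exact hne (by exact_mod_cast hc)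
      rw [he, List.filter_false, List.map_nil]
  -- both sides are lex-sorted permutations of each other
  have hperm : ((pvP ts).filter (fun p => p.2 == (t : Int))).Perm ((ts.getD t []).map (fun v => (v, (t : Int)))) := by
    rw [← hflat]; exact (pvP_perm ts).filter _
  have h1 : ((pvP ts).filter (fun p => p.2 == (t : Int))).Pairwise pvProp :=
    (pvP_lex ts).filter _
  have h2 : ((ts.getD t []).map (fun v => (v, (t : Int)))).Pairwise pvProp := by
    rw [List.pairwise_map]
    exact hteam.imp (fun {a b} h => pvProp_of_le_tag (t := (t:Int)) (a, (t:Int)) (b, (t:Int)) rfl rfl h)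
  exact List.eq_of_perm_of_sorted (fun a b _ _ hab hba => pvProp_antisymm hab hba) h1 h2 hperm

-- ===== counts and cursors =====
lemma pvCnt_zero (ts : List (List Int)) (t : Nat) : pvCnt ts t 0 = 0 := by
  simp [pvCnt]

lemma pvCnt_succ (ts : List (List Int)) (t l : Nat) (hl : l < (pvP ts).length) :
    pvCnt ts t (l + 1) = pvCnt ts t l + (if (pvP ts)[l].2 == (t : Int) then 1 else 0) := by
  unfold pvCnt
  rw [List.take_succ, List.getElem?_eq_getElem hl]
  simp only [Option.toList_some, List.filter_append]
  rw [List.length_append]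
  congr 1
  by_cases h : (pvP ts)[l].2 == (t : Int) <;> simp [List.filter, h]

lemma pvCnt_mono (ts : List (List Int)) (t : Nat) {l l' : Nat} (h : l ≤ l') :
    pvCnt ts t l ≤ pvCnt ts t l' := by
  unfold pvCnt
  exact List.Sublist.length_le (List.Sublist.filter _ (List.take_sublist_take_left (l := pvP ts) h))

lemma pvCnt_total (ts : List (List Int)) (hs : pvTS ts) (t : Nat) (ht : t < ts.length)
    {l : Nat} (hl : (pvP ts).length ≤ l) : pvCnt ts t l = pvLen ts t := by
  unfold pvCnt
  rw [List.take_of_length_le hl, pvP_filter ts hs t ht, List.length_map]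
  rfl

lemma pvCnt_le (ts : List (List Int)) (hs : pvTS ts) (t : Nat) (ht : t < ts.length) (l : Nat) :
    pvCnt ts t l ≤ pvLen ts t := by
  calc pvCnt ts t l ≤ pvCnt ts t (max l (pvP ts).length) := pvCnt_mono ts t (Nat.le_max_left _ _)
    _ = pvLen ts t := pvCnt_total ts hs t ht (Nat.le_max_right _ _)

-- filter of the remaining part of pvP: the tail of team t from its cursor on
lemma pvP_drop_filter (ts : List (List Int)) (hs : pvTS ts) (t : Nat) (ht : t < ts.length)
    (l : Nat) :
    ((pvP ts).drop l).filter (fun p => p.2 == (t : Int))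
      = ((ts.getD t []).map (fun v => (v, (t : Int)))).drop (pvCnt ts t l) := by
  have hsplit : (pvP ts).filter (fun p => p.2 == (t : Int))
      = ((pvP ts).take l).filter (fun p => p.2 == (t : Int))
        ++ ((pvP ts).drop l).filter (fun p => p.2 == (t : Int)) := by
    rw [← List.filter_append, List.take_append_drop]
  have := congrArg (List.drop (pvCnt ts t l)) hsplit.symm
  rwa [pvP_filter ts hs t ht, show pvCnt ts t l = (((pvP ts).take l).filter (fun p => p.2 == (t : Int))).length from rfl, List.drop_left] at this

-- every tag in pvP is a team index
lemma pvP_tag (ts : List (List Int)) {p : Int × Int} (hp : p ∈ pvP ts) :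
    ∃ t : Nat, t < ts.length ∧ p.2 = (t : Int) := by
  have : p ∈ pvFlat ts := (pvP_perm ts).mem_iff.mp hp
  unfold pvFlat at this
  rw [List.mem_flatMap] at this
  obtain ⟨t, ht, hmem⟩ := this
  rw [List.mem_map] at hmem
  obtain ⟨v, -, rfl⟩ := hmem
  exact ⟨t, List.mem_range.mp ht, rfl⟩

-- the element at position l is its team's cursor element
lemma pvP_cursor (ts : List (List Int)) (hs : pvTS ts) (t : Nat) (ht : t < ts.length)
    {l : Nat} (hl : l < (pvP ts).length) (htag : (pvP ts)[l].2 = (t : Int)) :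
    pvCnt ts t l < pvLen ts t ∧ pvPtr ts t l = (pvP ts)[l].1 := by
  have hdrop := pvP_drop_filter ts hs t ht l
  have hhead : ((pvP ts).drop l).head? = some (pvP ts)[l] := by
    rw [List.head?_eq_getElem?, List.getElem?_drop, Nat.add_zero, List.getElem?_eq_getElem hl]
  have hne : ((pvP ts).drop l) ≠ [] := by
    intro h; rw [h] at hhead; simp at hhead
  have hfirst : (((pvP ts).drop l).filter (fun p => p.2 == (t : Int))).head? = some (pvP ts)[l] := by
    cases hd : (pvP ts).drop l with
    | nil => exact absurd hd hne
    | cons x xs =>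
      rw [hd] at hhead
      simp only [List.head?_cons, Option.some.injEq] at hhead
      subst hhead
      rw [List.filter_cons_of_pos (by simp [htag])]
      simp
  rw [hdrop] at hfirst
  have hlt : pvCnt ts t l < pvLen ts t := by
    by_contra hge
    rw [List.drop_of_length_le (by simpa [pvLen] using Nat.le_of_not_lt hge)] at hfirst
    simp at hfirst
  refine ⟨hlt, ?_⟩
  have : (((ts.getD t []).map (fun v => (v, (t : Int)))).drop (pvCnt ts t l)).head?
      = some ((ts.getD t [])[pvCnt ts t l]'(hlt), (t : Int)) := by
    rw [List.head?_eq_getElem?, List.getElem?_drop, Nat.add_zero,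
      List.getElem?_eq_getElem (by simpa using hlt)]
    simp
  rw [this] at hfirst
  simp only [Option.some.injEq] at hfirst
  unfold pvPtr
  rw [List.getD_eq_getElem?_getD, List.getElem?_eq_getElem hlt, Option.getD_some]
  exact (congrArg Prod.fst hfirst.symm).symm

-- ===== coverage and the break position =====
def pvCov (ts : List (List Int)) (l : Nat) : Bool :=
  (List.range ts.length).all (fun t => pvCnt ts t l < pvLen ts t)
def pvBrk (ts : List (List Int)) : Nat :=
  Nat.findGreatest (fun l => pvCov ts l = true) ((pvP ts).length)

lemma pvCov_iff (ts : List (List Int)) (l : Nat) :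
    pvCov ts l = true ↔ ∀ t, t < ts.length → pvCnt ts t l < pvLen ts t := by
  unfold pvCov
  rw [List.all_eq_true]
  constructor
  · intro h t ht; simpa using h t (List.mem_range.mpr ht)
  · intro h t ht; simpa using h t (List.mem_range.mp ht)

lemma pvCov_anti (ts : List (List Int)) {l l' : Nat} (h : l ≤ l') (hc : pvCov ts l' = true) :
    pvCov ts l = true := by
  rw [pvCov_iff] at *
  exact fun t ht => Nat.lt_of_le_of_lt (pvCnt_mono ts t h) (hc t ht)

-- a good team family: nonempty, teams nonempty and sorted
lemma pvCov_zero (ts : List (List Int)) (hne : ∀ team ∈ ts, team ≠ []) :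
    pvCov ts 0 = true := by
  rw [pvCov_iff]
  intro t ht
  rw [pvCnt_zero]
  have : ts.getD t [] ≠ [] := by
    apply hne
    rw [List.getD_eq_getElem?_getD, List.getElem?_eq_getElem ht]
    exact List.getElem_mem ht
  unfold pvLen
  exact List.length_pos_iff.mpr this

lemma pvCov_len (ts : List (List Int)) (hs : pvTS ts) (hts : ts ≠ [])
    {l : Nat} (hl : (pvP ts).length ≤ l) : pvCov ts l = false := by
  rw [Bool.eq_false_iff]
  intro hc
  rw [pvCov_iff] at hc
  have h0 : 0 < ts.length := List.length_pos_iff.mpr hts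
  have := hc 0 h0
  rw [pvCnt_total ts hs 0 h0 hl] at this
  omega

lemma pvBrk_cov (ts : List (List Int)) (hne : ∀ team ∈ ts, team ≠ []) :
    pvCov ts (pvBrk ts) = true := by
  unfold pvBrk
  exact Nat.findGreatest_spec (P := fun l => pvCov ts l = true) (Nat.zero_le _) (pvCov_zero ts hne)

lemma pvBrk_lt (ts : List (List Int)) (hs : pvTS ts) (hts : ts ≠ [])
    (hne : ∀ team ∈ ts, team ≠ []) : pvBrk ts < (pvP ts).length := by
  have hcov := pvBrk_cov ts hne
  have hle : pvBrk ts ≤ (pvP ts).length := Nat.findGreatest_le _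
  rcases Nat.lt_or_ge (pvBrk ts) ((pvP ts).length) with h | h
  · exact h
  · rw [pvCov_len ts hs hts h] at hcov; exact absurd hcov (by simp)

lemma pvLe_brk_iff (ts : List (List Int)) (hs : pvTS ts) (hts : ts ≠ [])
    (hne : ∀ team ∈ ts, team ≠ []) (l : Nat) :
    l ≤ pvBrk ts ↔ pvCov ts l = true := by
  constructor
  · intro h; exact pvCov_anti ts h (pvBrk_cov ts hne)
  · intro h
    by_contra hgt
    have hlt : pvBrk ts < l := Nat.lt_of_not_le hgt
    have hlen : l ≤ (pvP ts).length := by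
      by_contra hx
      rw [pvCov_len ts hs hts (by omega)] at h; exact absurd h (by simp)
    exact (Nat.findGreatest_is_greatest hlt hlen) h

-- the cursor pair of team t sits in pvP at or after position l
lemma pvPtr_mem_drop (ts : List (List Int)) (hs : pvTS ts) (t : Nat) (ht : t < ts.length)
    (l : Nat) (hlt : pvCnt ts t l < pvLen ts t) :
    (pvPtr ts t l, (t : Int)) ∈ (pvP ts).drop l := by
  have hdrop := pvP_drop_filter ts hs t ht l
  have hmem : (pvPtr ts t l, (t : Int))
      ∈ ((ts.getD t []).map (fun v => (v, (t : Int)))).drop (pvCnt ts t l) := by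
    rw [List.mem_iff_getElem]
    refine ⟨0, by simpa using hlt, ?_⟩
    rw [List.getElem_drop]
    simp only [Nat.add_zero]
    rw [List.getElem_map]
    unfold pvPtr
    congr 1
    exact (List.getD_eq_getElem _ _ hlt).symm
  rw [← hdrop] at hmem
  exact List.mem_of_mem_filter hmem

-- lex order between a position and anything at or after it
lemma pvP_le_of_mem_drop (ts : List (List Int)) {l : Nat} (hl : l < (pvP ts).length)
    {q : Int × Int} (hq : q ∈ (pvP ts).drop l) : pvProp (pvP ts)[l] q := by
  rw [List.mem_iff_getElem] at hq
  obtain ⟨j, hj, rfl⟩ := hq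
  rw [List.getElem_drop]
  have hj' : l + j < (pvP ts).length := by
    rw [List.length_drop] at hj; omega
  rcases Nat.eq_zero_or_pos j with h | h
  · subst h
    simp only [Nat.add_zero]
    unfold pvProp; right; exact ⟨rfl, le_refl _⟩
  · exact (List.pairwise_iff_getElem.mp (pvP_lex ts)) l (l + j) hl hj' (by omega)

-- ===== running maximum of the cursors =====
def pvMaxPtr (ts : List (List Int)) (l : Nat) : Int :=
  ((List.range ts.length).map (fun t => pvPtr ts t l)).foldl max (pvPtr ts 0 l)

lemma pvMaxPtr_ge (ts : List (List Int)) (l : Nat) {t : Nat} (ht : t < ts.length) :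
    pvPtr ts t l ≤ pvMaxPtr ts l := by
  unfold pvMaxPtr
  exact (PySem.List.le_foldl_max _ _).2 _ (List.mem_map.mpr ⟨t, List.mem_range.mpr ht, rfl⟩)

lemma pvMaxPtr_mem (ts : List (List Int)) (l : Nat) (hts : ts ≠ []) :
    ∃ t, t < ts.length ∧ pvMaxPtr ts l = pvPtr ts t l := by
  unfold pvMaxPtr
  rcases PySem.List.foldl_max_mem ((List.range ts.length).map (fun t => pvPtr ts t l)) (pvPtr ts 0 l) with h | h
  · exact ⟨0, List.length_pos_iff.mpr hts, h⟩
  · rw [List.mem_map] at h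
    obtain ⟨t, ht, hv⟩ := h
    exact ⟨t, List.mem_range.mp ht, hv.symm⟩

-- sorted teams have monotone cursors
lemma pvTeam_mono {team : List Int} (hp : team.Pairwise (· ≤ ·)) {i j : Nat}
    (hij : i ≤ j) (hj : j < team.length) : team.getD i 0 ≤ team.getD j 0 := by
  rw [List.getD_eq_getElem _ _ (by omega), List.getD_eq_getElem _ _ hj]
  rcases Nat.eq_or_lt_of_le hij with h | h
  · subst h; exact le_refl _
  · exact List.pairwise_iff_getElem.mp hp i j (by omega) hj h

-- ===== good team families =====
def pvGood (K : Nat) (ts : List (List Int)) : Prop :=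
  0 < K ∧ ts ≠ [] ∧
  (∀ team ∈ ts, team ≠ [] ∧ team.length ≤ K ∧ team.Pairwise (· ≤ ·)) ∧
  (∀ t, t < ts.length → pvLen ts t < K →
     ∃ u, u < ts.length ∧ pvLen ts u = K ∧
       ((ts.getD u []).getD (K - 1) 0 < (ts.getD t []).getD (pvLen ts t - 1) 0 ∨
        ((ts.getD u []).getD (K - 1) 0 = (ts.getD t []).getD (pvLen ts t - 1) 0 ∧ u < t)))

lemma pvGood_ts (K : Nat) (ts : List (List Int)) (hg : pvGood K ts) : pvTS ts :=
  fun team h => (hg.2.2.1 team h).2.2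

lemma pvGood_mem (K : Nat) (ts : List (List Int)) (hg : pvGood K ts) {t : Nat}
    (ht : t < ts.length) : ts.getD t [] ≠ [] ∧ (ts.getD t []).length ≤ K := by
  have hm : ts.getD t [] ∈ ts := by
    rw [List.getD_eq_getElem _ _ ht]; exact List.getElem_mem ht
  exact ⟨(hg.2.2.1 _ hm).1, (hg.2.2.1 _ hm).2.1⟩

lemma pvGood_nonempty (K : Nat) (ts : List (List Int)) (hg : pvGood K ts) :
    ∀ team ∈ ts, team ≠ [] := fun team h => (hg.2.2.1 team h).1

-- the team whose pop breaks the loop is a full team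
lemma pvBrk_full (K : Nat) (ts : List (List Int)) (hg : pvGood K ts) :
    ∃ t, t < ts.length ∧ ((pvP ts)[pvBrk ts]'(pvBrk_lt ts (pvGood_ts K ts hg) hg.2.1 (pvGood_nonempty K ts hg))).2 = (t : Int) ∧
      pvCnt ts t (pvBrk ts + 1) = pvLen ts t ∧ pvLen ts t = K := by
  have hs := pvGood_ts K ts hg
  have hts := hg.2.1
  have hne := pvGood_nonempty K ts hg
  have hBlt := pvBrk_lt ts hs hts hne
  set B := pvBrk ts with hBdef
  -- the tag at B
  obtain ⟨t, ht, htag⟩ := pvP_tag ts (List.getElem_mem hBlt)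
  refine ⟨t, ht, htag, ?_⟩
  -- coverage fails at B+1
  have hnc : pvCov ts (B + 1) = false := by
    rw [Bool.eq_false_iff]
    intro hc
    have := (pvLe_brk_iff ts hs hts hne (B + 1)).mpr hc
    omega
  have hfail : ∃ u, u < ts.length ∧ ¬ pvCnt ts u (B + 1) < pvLen ts u := by
    by_contra hx
    push_neg at hx
    rw [pvCov_iff ts (B+1) |>.mpr hx] at hnc
    exact absurd hnc (by simp)
  obtain ⟨u, hu, hucnt⟩ := hfail
  have hcovB : pvCov ts B = true := pvBrk_cov ts hne
  have hcovB' := (pvCov_iff ts B).mp hcovB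
  -- only team t's count changes from B to B+1
  have hstep := pvCnt_succ ts u B hBlt
  have hut : u = t := by
    by_contra hne'
    rw [htag] at hstep
    have : ((t : Int) == (u : Int)) = false := by
      rw [beq_eq_false_iff_ne]
      intro h; exact hne' (by exact_mod_cast h.symm)
    rw [this] at hstep
    simp at hstep
    have := hcovB' u hu
    omega
  subst hut
  have hcnt1 : pvCnt ts u (B + 1) = pvLen ts u := by
    have hle := pvCnt_le ts hs u hu (B + 1)
    omega
  refine ⟨hcnt1, ?_⟩
  -- if team u were short, a full team's last element would come strictly before B
  by_contra hshort
  have hlenK : pvLen ts u < K := by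
    have := (pvGood_mem K ts hg hu).2
    unfold pvLen at *
    omega
  obtain ⟨w, hw, hwK, hwlex⟩ := hg.2.2.2 u hu hlenK
  have hwu : w ≠ u := by intro h; subst h; omega
  -- the count of w just before B
  have hcw := hcovB' w hw
  -- w's last element lies at or after position B+1
  have hcw1 : pvCnt ts w (B + 1) = pvCnt ts w B := by
    have hstepw := pvCnt_succ ts w B hBlt
    rw [htag] at hstepw
    have : ((u : Int) == (w : Int)) = false := by
      rw [beq_eq_false_iff_ne]
      intro h; exact hwu (by exact_mod_cast h.symm)
    rw [this] at hstepw
    simpa using hstepw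
  have hcwlt : pvCnt ts w (B + 1) < pvLen ts w := by rw [hcw1]; exact hcw
  -- w's last element (its K-th smallest) is in the tail beyond B
  have hlast : ((ts.getD w []).getD (K - 1) 0, (w : Int)) ∈ (pvP ts).drop (B + 1) := by
    have hdrop := pvP_drop_filter ts hs w hw (B + 1)
    have hmem : ((ts.getD w []).getD (K - 1) 0, (w : Int))
        ∈ ((ts.getD w []).map (fun v => (v, (w : Int)))).drop (pvCnt ts w (B + 1)) := by
      rw [List.mem_iff_getElem]
      have hKlen : (ts.getD w []).length = K := hwK
      refine ⟨K - 1 - pvCnt ts w (B + 1), ?_, ?_⟩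
      · simp only [List.length_drop, List.length_map]
        unfold pvLen at hcwlt hwK
        omega
      · rw [List.getElem_drop, List.getElem_map]
        have harith : pvCnt ts w (B + 1) + (K - 1 - pvCnt ts w (B + 1)) = K - 1 := by
          unfold pvLen at hcwlt hwK
          omega
        simp only [harith]
        rw [List.getD_eq_getElem _ _ (show K - 1 < (ts.getD w []).length by
          unfold pvLen at hwK; omega)]
    rw [← hdrop] at hmem
    exact List.mem_of_mem_filter hmem
  -- but it is lex-smaller than P[B], contradiction with sortedness
  have hmemB : ((ts.getD w []).getD (K - 1) 0, (w : Int)) ∈ (pvP ts).drop B := by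
    rw [List.drop_eq_getElem_cons hBlt]
    exact List.mem_cons_of_mem _ hlast
  have hle := pvP_le_of_mem_drop ts hBlt hmemB
  -- P[B] is team u's last element
  have hcur := pvP_cursor ts hs u hu hBlt htag
  have hcntB : pvCnt ts u B = pvLen ts u - 1 := by
    have hstepu := pvCnt_succ ts u B hBlt
    rw [htag] at hstepu
    simp at hstepu
    omega
  have hPB1 : (pvP ts)[B].1 = (ts.getD u []).getD (pvLen ts u - 1) 0 := by
    rw [← hcur.2, pvPtr, hcntB]
  unfold pvProp at hle
  rw [hPB1, htag] at hle
  dsimp only at hle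
  rcases hle with h' | ⟨h1', h2'⟩
  · rcases hwlex with h | ⟨h1, h2⟩ <;> omega
  · have hponat : u ≤ w := by exact_mod_cast h2'
    rcases hwlex with h | ⟨h1, h2⟩ <;> omega

-- tags other than the one at l keep their count and cursor
lemma pvPtr_succ_ne (ts : List (List Int)) {l : Nat} (hl : l < (pvP ts).length)
    {t : Nat} (htag : (pvP ts)[l].2 ≠ (t : Int)) :
    pvCnt ts t (l + 1) = pvCnt ts t l ∧ pvPtr ts t (l + 1) = pvPtr ts t l := by
  have hstep := pvCnt_succ ts t l hl
  rw [if_neg (by simpa using htag)] at hstep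
  refine ⟨by omega, ?_⟩
  unfold pvPtr
  rw [hstep, Nat.add_zero]

lemma pvCnt_succ_self (ts : List (List Int)) {l : Nat} (hl : l < (pvP ts).length)
    {t : Nat} (htag : (pvP ts)[l].2 = (t : Int)) :
    pvCnt ts t (l + 1) = pvCnt ts t l + 1 := by
  have hstep := pvCnt_succ ts t l hl
  rw [if_pos (by simpa using htag)] at hstep
  omega

-- the running maximum after advancing the cursor of the team popped at l
lemma pvMaxPtr_step (K : Nat) (ts : List (List Int)) (hg : pvGood K ts)
    {l : Nat} (hl : l < (pvP ts).length) {t : Nat} (ht : t < ts.length)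
    (htag : (pvP ts)[l].2 = (t : Int))
    (hcov1 : pvCov ts (l + 1) = true) :
    pvMaxPtr ts (l + 1) = max (pvMaxPtr ts l) (pvPtr ts t (l + 1)) := by
  have hs := pvGood_ts K ts hg
  have hts := hg.2.1
  have hcov1' := (pvCov_iff ts (l + 1)).mp hcov1
  apply le_antisymm
  · obtain ⟨u, hu, hv⟩ := pvMaxPtr_mem ts (l + 1) hts
    rw [hv]
    by_cases hut : u = t
    · subst hut; exact le_max_right _ _
    · have := (pvPtr_succ_ne ts hl (t := u) (by rw [htag]; intro h; exact hut (by exact_mod_cast h.symm))).2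
      rw [this]
      exact le_trans (pvMaxPtr_ge ts l hu) (le_max_left _ _)
  · apply max_le
    · obtain ⟨u, hu, hv⟩ := pvMaxPtr_mem ts l hts
      rw [hv]
      by_cases hut : u = t
      · subst hut
        have hc1 := pvCnt_succ_self ts hl htag
        have hmono : pvPtr ts u l ≤ pvPtr ts u (l + 1) := by
          unfold pvPtr
          apply pvTeam_mono ((hg.2.2.1 _ (by rw [List.getD_eq_getElem _ _ hu]; exact List.getElem_mem hu)).2.2)
          · omega
          · exact hcov1' u hu
        exact le_trans hmono (pvMaxPtr_ge ts (l + 1) hu)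
      · have := (pvPtr_succ_ne ts hl (t := u) (by rw [htag]; intro h; exact hut (by exact_mod_cast h.symm))).2
        rw [← this]
        exact pvMaxPtr_ge ts (l + 1) hu
    · exact pvMaxPtr_ge ts (l + 1) ht

-- ===== the heap primitive: popping the lexicographic minimum =====
lemma pvLexLe_iff (a b : Int × Int) : pvLexLe a b = true ↔ pvProp a b := by
  unfold pvLexLe pvProp
  simp only [Bool.or_eq_true, decide_eq_true_eq, Bool.and_eq_true, beq_iff_eq]

lemma pvPopMin_spec : ∀ (h : List (Int × Int)), h ≠ [] →
    ∃ m rest, pvPopMin h = some (m, rest) ∧ (m :: rest).Perm h ∧ ∀ x ∈ h, pvProp m x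
  | [], hne => absurd rfl hne
  | p :: t, _ => by
    cases ht : t with
    | nil =>
      subst ht
      refine ⟨p, [], by simp [pvPopMin], by simp, ?_⟩
      intro x hx
      have hx' : x = p := by simpa using hx
      subst hx'
      exact Or.inr ⟨rfl, le_refl _⟩
    | cons q t' =>
      subst ht
      obtain ⟨m, rest, hpop, hperm, hmin⟩ := pvPopMin_spec (q :: t') (by simp)
      by_cases hle : pvLexLe p m = true
      · refine ⟨p, q :: t', ?_, List.Perm.refl _, ?_⟩
        · rw [show pvPopMin (p :: q :: t') = (match pvPopMin (q :: t') with
              | none => some (p, [])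
              | some (qq, rest') => if pvLexLe p qq then some (p, q :: t') else some (qq, p :: rest')) from rfl, hpop]
          simp [hle]
        · intro x hx
          rcases List.mem_cons.mp hx with rfl | hx
          · exact Or.inr ⟨rfl, le_refl _⟩
          · have h1 : pvProp p m := (pvLexLe_iff p m).mp hle
            have h2 : pvProp m x := hmin x hx
            unfold pvProp at *
            omega
      · refine ⟨m, p :: rest, ?_, ?_, ?_⟩
        · rw [show pvPopMin (p :: q :: t') = (match pvPopMin (q :: t') with
              | none => some (p, [])
              | some (qq, rest') => if pvLexLe p qq then some (p, q :: t') else some (qq, p :: rest')) from rfl, hpop]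
          simp [hle]
        · exact List.Perm.trans (List.Perm.swap p m rest) (List.Perm.cons p hperm)
        · intro x hx
          rcases List.mem_cons.mp hx with rfl | hx
          · have hnp : ¬ pvProp x m := fun hc => hle ((pvLexLe_iff x m).mpr hc)
            unfold pvProp at *
            omega
          · exact hmin x hx

-- ===== the heap contents: one cursor pair per team =====
def pvPairs (ts : List (List Int)) (l : Nat) : List (Int × Int) :=
  (List.range ts.length).map (fun t => (pvPtr ts t l, (t : Int)))

lemma pvRange_split {N t : Nat} (ht : t < N) :
    List.range N = List.range t ++ t :: (List.range (N - t - 1)).map (fun j => t + 1 + j) := by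
  have h1 : N = t + 1 + (N - t - 1) := by omega
  conv_lhs => rw [h1]
  rw [List.range_add, List.range_add, List.range_one]
  simp

lemma pvP_mem_pairs (ts : List (List Int)) (hs : pvTS ts) {l : Nat}
    (hl : l < (pvP ts).length) {t : Nat} (ht : t < ts.length)
    (htag : (pvP ts)[l].2 = (t : Int)) : (pvP ts)[l] = (pvPtr ts t l, (t : Int)) := by
  have hcur := pvP_cursor ts hs t ht hl htag
  exact Prod.ext (hcur.2).symm htag

lemma pvPairs_min (ts : List (List Int)) (hs : pvTS ts) {l : Nat}
    (hl : l < (pvP ts).length) (hcov : pvCov ts l = true) :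
    ∀ x ∈ pvPairs ts l, pvProp (pvP ts)[l] x := by
  intro x hx
  unfold pvPairs at hx
  rw [List.mem_map] at hx
  obtain ⟨u, hu, rfl⟩ := hx
  have hu' := List.mem_range.mp hu
  have hcnt := (pvCov_iff ts l).mp hcov u hu'
  exact pvP_le_of_mem_drop ts hl (pvPtr_mem_drop ts hs u hu' l hcnt)

-- ===== fold-min algebra and the window list =====
lemma pvFoldlMin_min (xs : List Int) (a b : Int) :
    xs.foldl min (min a b) = min a (xs.foldl min b) := by
  induction xs generalizing b with
  | nil => simp
  | cons x t ih =>
    simp only [List.foldl_cons]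
    rw [show min (min a b) x = min a (min b x) by omega, ih]

def pvOMin (md : Option Int) (d : Int) : Int := match md with | none => d | some m => min m d
def pvWin (ts : List (List Int)) (l : Nat) : Int := pvMaxPtr ts l - ((pvP ts).getD l (0, 0)).1
def pvWinMin (ts : List (List Int)) (l : Nat) : Int :=
  ((List.range' (l + 1) (pvBrk ts - l)).map (pvWin ts)).foldl min (pvWin ts l)

lemma pvWinMin_last (ts : List (List Int)) : pvWinMin ts (pvBrk ts) = pvWin ts (pvBrk ts) := by
  unfold pvWinMin
  rw [Nat.sub_self]
  simp

lemma pvWinMin_step (ts : List (List Int)) {l : Nat} (hl : l < pvBrk ts) :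
    pvWinMin ts l = min (pvWin ts l) (pvWinMin ts (l + 1)) := by
  unfold pvWinMin
  have h1 : pvBrk ts - l = (pvBrk ts - (l + 1)) + 1 := by omega
  rw [h1, List.range'_succ, List.map_cons, List.foldl_cons, pvFoldlMin_min]

lemma pvPairs_decomp (ts : List (List Int)) (l : Nat) {t : Nat} (ht : t < ts.length) :
    pvPairs ts l
      = (List.range t).map (fun u => (pvPtr ts u l, (u : Int)))
        ++ (pvPtr ts t l, (t : Int))
          :: (List.range (ts.length - t - 1)).map (fun j => (pvPtr ts (t + 1 + j) l, ((t + 1 + j : Nat) : Int))) := by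
  unfold pvPairs
  rw [pvRange_split ht]
  simp [List.map_append, List.map_map, Function.comp_def]

lemma pvPairs_decomp_succ (ts : List (List Int)) {l : Nat} (hl : l < (pvP ts).length)
    {t : Nat} (ht : t < ts.length) (htag : (pvP ts)[l].2 = (t : Int)) :
    pvPairs ts (l + 1)
      = (List.range t).map (fun u => (pvPtr ts u l, (u : Int)))
        ++ (pvPtr ts t (l + 1), (t : Int))
          :: (List.range (ts.length - t - 1)).map (fun j => (pvPtr ts (t + 1 + j) l, ((t + 1 + j : Nat) : Int))) := by
  rw [pvPairs_decomp ts (l + 1) ht]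
  congr 1
  · apply List.map_congr_left
    intro u hu
    have hu' := List.mem_range.mp hu
    rw [(pvPtr_succ_ne ts hl (t := u) (by rw [htag]; intro h; have : t = u := (by exact_mod_cast h); omega)).2]
  · congr 1
    apply List.map_congr_left
    intro j _
    rw [(pvPtr_succ_ne ts hl (t := t + 1 + j) (by rw [htag]; intro h; have : t = t + 1 + j := (by exact_mod_cast h); omega)).2]

lemma pvHeap_pop (ts : List (List Int)) (hs : pvTS ts) (hts : ts ≠ [])
    (hne : ∀ team ∈ ts, team ≠ []) {l : Nat} (hlB : l ≤ pvBrk ts)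
    {heap : List (Int × Int)} (hperm : heap.Perm (pvPairs ts l)) :
    ∃ rest, pvPopMin heap = some ((pvP ts)[l]'(Nat.lt_of_le_of_lt hlB (pvBrk_lt ts hs hts hne)), rest)
      ∧ ((pvP ts)[l]'(Nat.lt_of_le_of_lt hlB (pvBrk_lt ts hs hts hne)) :: rest).Perm (pvPairs ts l) := by
  have hl : l < (pvP ts).length := Nat.lt_of_le_of_lt hlB (pvBrk_lt ts hs hts hne)
  have hcov : pvCov ts l = true := (pvLe_brk_iff ts hs hts hne l).mp hlB
  have hnonempty : heap ≠ [] := by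
    intro h
    subst h
    have := hperm.symm.eq_nil
    unfold pvPairs at this
    rw [List.map_eq_nil_iff, List.range_eq_nil] at this
    exact hts (List.length_eq_zero_iff.mp this)
  obtain ⟨m, rest, hpop, hmr, hmin⟩ := pvPopMin_spec heap hnonempty
  obtain ⟨t, ht, htag⟩ := pvP_tag ts (List.getElem_mem hl)
  have hPl : (pvP ts)[l] = (pvPtr ts t l, (t : Int)) := pvP_mem_pairs ts hs hl ht htag
  have hPmem : (pvP ts)[l] ∈ heap := by
    rw [hperm.mem_iff, hPl]
    exact List.mem_map.mpr ⟨t, List.mem_range.mpr ht, rfl⟩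
  have h1 : pvProp m (pvP ts)[l] := hmin _ hPmem
  have h2 : pvProp (pvP ts)[l] m := by
    apply pvPairs_min ts hs hl hcov
    rw [← hperm.mem_iff]
    exact hmr.mem_iff.mp (List.mem_cons_self)
  have hm : m = (pvP ts)[l] := pvProp_antisymm h1 h2
  subst hm
  exact ⟨rest, hpop, hmr.trans hperm⟩

lemma pvIdx_get (ts : List (List Int)) (l : Nat) {t : Nat} (ht : t < ts.length) :
    (PySem.List.pyGet? ((List.range ts.length).map (fun u => (pvCnt ts u l : Int))) (t : Int)).getD 0
      = (pvCnt ts t l : Int) := by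
  rw [PySem.List.pyGet?_natCast]
  rw [List.getElem?_map, List.getElem?_range ht]
  rfl

lemma pvIdx_set (ts : List (List Int)) {l : Nat} (hl : l < (pvP ts).length)
    {t : Nat} (ht : t < ts.length) (htag : (pvP ts)[l].2 = (t : Int)) :
    ((List.range ts.length).map (fun u => (pvCnt ts u l : Int))).set t ((pvCnt ts t l : Int) + 1)
      = (List.range ts.length).map (fun u => (pvCnt ts u (l + 1) : Int)) := by
  apply List.ext_getElem (by simp)
  intro i h1 h2
  rw [List.getElem_set]
  simp only [List.getElem_map, List.getElem_range]
  have hi : i < ts.length := by simpa using h2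
  by_cases hit : t = i
  · subst hit
    rw [if_pos rfl, pvCnt_succ_self ts hl htag]
    push_cast
    ring
  · rw [if_neg hit, (pvPtr_succ_ne ts hl (t := i) (by rw [htag]; intro h; exact hit (by exact_mod_cast h))).1]

lemma pvWin_eq (ts : List (List Int)) {l : Nat} (hl : l < (pvP ts).length) :
    pvWin ts l = pvMaxPtr ts l - ((pvP ts)[l]).1 := by
  unfold pvWin
  rw [List.getD_eq_getElem _ _ hl]

lemma pvOMin_assoc (md : Option Int) (a b : Int) :
    pvOMin (some (pvOMin md a)) b = pvOMin md (min a b) := by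
  cases md <;> simp [pvOMin] <;> omega

-- the main loop lemma: from any state of the sweep, A's loop returns the running
-- minimum folded with the remaining windows
lemma pvLoop_eq (K : Nat) (ts ss : List (List Int)) (k : Int) (hg : pvGood K ts)
    (hk : k = (K : Int))
    (hconn : ∀ t, t < ts.length → ∃ full : List Int,
        PySem.List.pyGet? ss (t : Int) = some full ∧ (ts.getD t []).IsPrefix full) :
    ∀ (dl l : Nat) (heap : List (Int × Int)) (md : Option Int) (fuel : Nat),
      l + dl = pvBrk ts →
      heap.Perm (pvPairs ts l) →
      dl < fuel →
      pvSolveLoop ss k fuel heap ((List.range ts.length).map (fun u => (pvCnt ts u l : Int))) md (pvMaxPtr ts l)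
        = pvOMin md (pvWinMin ts l) := by
  have hs := pvGood_ts K ts hg
  have hts := hg.2.1
  have hne := pvGood_nonempty K ts hg
  intro dl
  induction dl with
  | zero =>
    intro l heap md fuel hlB hperm hfuel
    rw [Nat.add_zero] at hlB
    subst hlB
    have hl : (pvBrk ts) < (pvP ts).length := pvBrk_lt ts hs hts hne
    obtain ⟨rest, hpop, hrest⟩ := pvHeap_pop ts hs hts hne (le_refl (pvBrk ts)) hperm
    obtain ⟨t, ht, htag, hcnt1, hlenK⟩ := pvBrk_full K ts hg
    cases fuel with
    | zero => omega
    | succ f =>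
      rw [show pvSolveLoop ss k (f+1) heap ((List.range ts.length).map (fun u => (pvCnt ts u (pvBrk ts) : Int))) md (pvMaxPtr ts (pvBrk ts))
          = (match pvPopMin heap with
            | none => md.getD 0
            | some ((cmin, ti), rest) =>
              let d := pvMaxPtr ts (pvBrk ts) - cmin
              let md' : Option Int := some (match md with | none => d | some m => min m d)
              let idx := (PySem.List.pyGet? ((List.range ts.length).map (fun u => (pvCnt ts u (pvBrk ts) : Int))) ti).getD 0 + 1
              let indices' := ((List.range ts.length).map (fun u => (pvCnt ts u (pvBrk ts) : Int))).set ti.toNat idx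
              if idx == k then md'.getD 0
              else
                match (PySem.List.pyGet? ss ti).bind (fun team => PySem.List.pyGet? team idx) with
                | none => md'.getD 0
                | some nxt => pvSolveLoop ss k f (rest ++ [(nxt, ti)]) indices' md' (max (pvMaxPtr ts (pvBrk ts)) nxt)) from rfl,
        hpop]
      dsimp only
      simp only [List.get_eq_getElem]
      rw [htag, pvIdx_get ts (pvBrk ts) ht, pvWinMin_last]
      have htest : (((pvCnt ts t (pvBrk ts) : Int) + 1) == k) = true := by
        rw [hk, beq_iff_eq]
        have hstep := pvCnt_succ_self ts hl htag
        have h2 : pvCnt ts t (pvBrk ts) + 1 = K := by omega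
        exact_mod_cast h2
      rw [htest]
      simp only [if_true]
      rw [pvWin_eq ts hl]
      cases md <;> rfl
  | succ dln ih =>
    intro l heap md fuel hlB hperm hfuel
    have hlltB : l < pvBrk ts := by omega
    have hlB' : l ≤ pvBrk ts := by omega
    have hl : l < (pvP ts).length := Nat.lt_of_le_of_lt hlB' (pvBrk_lt ts hs hts hne)
    obtain ⟨rest, hpop, hrest⟩ := pvHeap_pop ts hs hts hne hlB' hperm
    obtain ⟨t, ht, htag⟩ := pvP_tag ts (List.getElem_mem hl)
    cases fuel with
    | zero => omega
    | succ f =>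
      rw [show pvSolveLoop ss k (f+1) heap ((List.range ts.length).map (fun u => (pvCnt ts u l : Int))) md (pvMaxPtr ts l)
          = (match pvPopMin heap with
            | none => md.getD 0
            | some ((cmin, ti), rest) =>
              let d := pvMaxPtr ts l - cmin
              let md' : Option Int := some (match md with | none => d | some m => min m d)
              let idx := (PySem.List.pyGet? ((List.range ts.length).map (fun u => (pvCnt ts u l : Int))) ti).getD 0 + 1
              let indices' := ((List.range ts.length).map (fun u => (pvCnt ts u l : Int))).set ti.toNat idx
              if idx == k then md'.getD 0
              else
                match (PySem.List.pyGet? ss ti).bind (fun team => PySem.List.pyGet? team idx) with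
                | none => md'.getD 0
                | some nxt => pvSolveLoop ss k f (rest ++ [(nxt, ti)]) indices' md' (max (pvMaxPtr ts l) nxt)) from rfl,
        hpop]
      dsimp only
      simp only [List.get_eq_getElem]
      rw [htag, pvIdx_get ts l ht]
      -- the loop does not break before B
      have hcov1 : pvCov ts (l + 1) = true := (pvLe_brk_iff ts hs hts hne (l + 1)).mp (by omega)
      have hcnt1 : pvCnt ts t (l + 1) < pvLen ts t := (pvCov_iff ts (l + 1)).mp hcov1 t ht
      have htest : (((pvCnt ts t l : Int) + 1) == k) = false := by
        rw [hk, beq_eq_false_iff_ne]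
        have hstep := pvCnt_succ_self ts hl htag
        have hKle : pvLen ts t ≤ K := by
          have := (pvGood_mem K ts hg ht).2
          unfold pvLen
          omega
        push_cast
        omega
      rw [htest]
      simp only [Bool.false_eq_true, if_false]
      -- fetch the next element of team t
      obtain ⟨full, hfull, hpre⟩ := hconn t ht
      rw [hfull]
      have hc1len : pvCnt ts t (l + 1) < full.length :=
        Nat.lt_of_lt_of_le hcnt1 (Nat.le_trans (le_refl _) hpre.length_le)
      have hidx : ((pvCnt ts t l : Int) + 1) = ((pvCnt ts t (l + 1) : Nat) : Int) := by
        rw [pvCnt_succ_self ts hl htag]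
        push_cast
        ring
      rw [hidx]
      rw [show (Option.bind (some full) fun team => PySem.List.pyGet? team ((pvCnt ts t (l+1) : Nat) : Int))
          = PySem.List.pyGet? full ((pvCnt ts t (l+1) : Nat) : Int) from rfl]
      rw [PySem.List.pyGet?_natCast, List.getElem?_eq_getElem hc1len]
      dsimp only
      have hnxt : full[pvCnt ts t (l + 1)] = pvPtr ts t (l + 1) := by
        unfold pvPtr
        rw [List.getD_eq_getElem _ _ hcnt1]
        exact (List.IsPrefix.getElem hpre _).symm
      -- assemble the recursive call
      have hset := pvIdx_set ts hl ht htag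
      rw [show ((t : Int)).toNat = t from Int.toNat_natCast t]
      rw [show ((pvCnt ts t l : Int) + 1) = ((pvCnt ts t (l+1) : Nat) : Int) from hidx] at hset
      rw [hset, hnxt]
      -- new heap is the cursor multiset at l+1
      have hperm' : (rest ++ [(pvPtr ts t (l + 1), (t : Int))]).Perm (pvPairs ts (l + 1)) := by
        have hdec := pvPairs_decomp ts l ht
        have hPl : (pvP ts)[l] = (pvPtr ts t l, (t : Int)) := pvP_mem_pairs ts hs hl ht htag
        have hrest' : rest.Perm ((List.range t).map (fun u => (pvPtr ts u l, (u : Int)))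
            ++ (List.range (ts.length - t - 1)).map (fun j => (pvPtr ts (t + 1 + j) l, ((t + 1 + j : Nat) : Int)))) := by
          have := hrest
          rw [hdec, hPl] at this
          exact (this.trans List.perm_middle).cons_inv
        rw [pvPairs_decomp_succ ts hl ht htag]
        exact (List.perm_append_singleton _ _).trans
          ((hrest'.cons _).trans List.perm_middle.symm)
      have hmax := pvMaxPtr_step K ts hg hl ht htag hcov1
      rw [← hmax]
      rw [ih (l + 1) _ _ f (by omega) hperm' (by omega)]
      rw [show (match md with | none => pvMaxPtr ts l - (pvP ts)[l].1 | some m => min m (pvMaxPtr ts l - (pvP ts)[l].1))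
          = pvOMin md (pvWin ts l) by rw [pvWin_eq ts hl]; cases md <;> rfl]
      rw [pvOMin_assoc, ← pvWinMin_step ts hlltB]

-- ===== the backward sweep: state characterisation =====
def pvSeen (ts : List (List Int)) (l : Nat) : List (Option Int) :=
  (List.range ts.length).map (fun t => if pvCnt ts t l < pvLen ts t then some (pvPtr ts t l) else none)
def pvMiss (ts : List (List Int)) (l : Nat) : Nat :=
  ((List.range ts.length).filter (fun t => decide (pvLen ts t ≤ pvCnt ts t l))).length
def pvBestO (ts : List (List Int)) (l : Nat) : Option Int :=
  if l ≤ pvBrk ts then some (pvWinMin ts l) else none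

lemma pvMiss_zero_iff (ts : List (List Int)) (l : Nat) :
    pvMiss ts l = 0 ↔ pvCov ts l = true := by
  unfold pvMiss
  rw [List.length_eq_zero_iff, List.filter_eq_nil_iff, pvCov_iff]
  constructor
  · intro h t ht
    have := h t (List.mem_range.mpr ht)
    simpa using this
  · intro h t ht
    simpa using h t (List.mem_range.mp ht)

lemma pvMaxSeen_cov (ts : List (List Int)) (hts : ts ≠ []) {l : Nat}
    (hcov : pvCov ts l = true) : pvMaxSeen (pvSeen ts l) = pvMaxPtr ts l := by
  have hcov' := (pvCov_iff ts l).mp hcov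
  have hmap : pvSeen ts l = (List.range ts.length).map (fun t => some (pvPtr ts t l)) := by
    unfold pvSeen
    apply List.map_congr_left
    intro t ht
    rw [if_pos (hcov' t (List.mem_range.mp ht))]
  have hfm : (pvSeen ts l).filterMap (fun x => x) = (List.range ts.length).map (fun t => pvPtr ts t l) := by
    rw [hmap, List.filterMap_map]
    simp [Function.comp_def]
  unfold pvMaxSeen
  rw [hfm]
  have hN : 0 < ts.length := List.length_pos_iff.mpr hts
  have hcons : (List.range ts.length).map (fun t => pvPtr ts t l)
      = pvPtr ts 0 l :: (List.range (ts.length - 1)).map (fun j => pvPtr ts (0 + 1 + j) l) := by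
    have := pvRange_split (t := 0) hN
    rw [this]
    simp
  rw [hcons, PySem.List.max?_id_cons]
  unfold pvMaxPtr
  rw [hcons]
  simp only [List.foldl_cons]
  rw [show max (pvPtr ts 0 l) (pvPtr ts 0 l) = pvPtr ts 0 l by omega]

lemma pvSeen_get (ts : List (List Int)) (l : Nat) {t : Nat} (ht : t < ts.length) :
    (PySem.List.pyGet? (pvSeen ts l) (t : Int)).getD none
      = (if pvCnt ts t l < pvLen ts t then some (pvPtr ts t l) else none) := by
  unfold pvSeen
  rw [PySem.List.pyGet?_natCast, List.getElem?_map, List.getElem?_range ht]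
  rfl

lemma pvSeen_set (ts : List (List Int)) (hs : pvTS ts) {l : Nat} (hl : l < (pvP ts).length)
    {t : Nat} (ht : t < ts.length) (htag : (pvP ts)[l].2 = (t : Int)) :
    (pvSeen ts (l + 1)).set t (some ((pvP ts)[l].1)) = pvSeen ts l := by
  unfold pvSeen
  apply List.ext_getElem (by simp)
  intro i h1 h2
  rw [List.getElem_set]
  simp only [List.getElem_map, List.getElem_range]
  have hi : i < ts.length := by simpa using h2
  by_cases hit : t = i
  · subst hit
    have hcur := pvP_cursor ts hs t ht hl htag
    rw [if_pos rfl, if_pos hcur.1, hcur.2]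
  · rw [if_neg hit]
    have hne' : (pvP ts)[l].2 ≠ (i : Int) := by
      rw [htag]; intro h; exact hit (by exact_mod_cast h)
    rw [(pvPtr_succ_ne ts hl hne').1, (pvPtr_succ_ne ts hl hne').2]

lemma pvMiss_step (ts : List (List Int)) (hs : pvTS ts) {l : Nat} (hl : l < (pvP ts).length)
    {t : Nat} (ht : t < ts.length) (htag : (pvP ts)[l].2 = (t : Int)) :
    pvMiss ts (l + 1) = pvMiss ts l + (if pvCnt ts t (l + 1) < pvLen ts t then 0 else 1) := by
  unfold pvMiss
  rw [pvRange_split ht, List.filter_append, List.filter_append, List.filter_cons, List.filter_cons]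
  -- off-team entries do not change between l and l+1
  have hoff : ∀ u, u ≠ t → pvCnt ts u (l + 1) = pvCnt ts u l := by
    intro u hu
    exact (pvPtr_succ_ne ts hl (t := u) (by rw [htag]; intro h; exact hu (by exact_mod_cast h.symm))).1
  have h1 : (List.range t).filter (fun u => decide (pvLen ts u ≤ pvCnt ts u (l + 1)))
      = (List.range t).filter (fun u => decide (pvLen ts u ≤ pvCnt ts u l)) := by
    apply List.filter_congr
    intro u hu
    rw [hoff u (by have := List.mem_range.mp hu; omega)]
  have h2 : ((List.range (ts.length - t - 1)).map (fun j => t + 1 + j)).filter (fun u => decide (pvLen ts u ≤ pvCnt ts u (l + 1)))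
      = ((List.range (ts.length - t - 1)).map (fun j => t + 1 + j)).filter (fun u => decide (pvLen ts u ≤ pvCnt ts u l)) := by
    apply List.filter_congr
    intro u hu
    rw [List.mem_map] at hu
    obtain ⟨j, -, rfl⟩ := hu
    rw [hoff _ (by omega)]
  rw [h1, h2]
  -- team t is present at l (it occurs at position l), maybe saturated at l+1
  have htl : pvCnt ts t l < pvLen ts t := (pvP_cursor ts hs t ht hl htag).1
  rw [show (decide (pvLen ts t ≤ pvCnt ts t l)) = false from by simpa using (by omega : ¬ pvLen ts t ≤ pvCnt ts t l)]
  by_cases hsat : pvCnt ts t (l + 1) < pvLen ts t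
  · rw [if_pos hsat, show (decide (pvLen ts t ≤ pvCnt ts t (l + 1))) = false from by simpa using (by omega : ¬ pvLen ts t ≤ pvCnt ts t (l + 1))]
    simp
  · rw [if_neg hsat, show (decide (pvLen ts t ≤ pvCnt ts t (l + 1))) = true from by simpa using (by omega : pvLen ts t ≤ pvCnt ts t (l + 1))]
    simp
    omega

lemma pvSweep_eq (ts : List (List Int)) (hs : pvTS ts) (hts : ts ≠ [])
    (hne : ∀ team ∈ ts, team ≠ []) :
    ∀ l, l ≤ (pvP ts).length →
      pvSweep (((pvP ts).take l).reverse) (pvSeen ts l) ((pvMiss ts l : Int)) (pvBestO ts l)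
        = pvBestO ts 0 := by
  intro l
  induction l with
  | zero => intro _; simp [pvSweep]
  | succ l ih =>
    intro hl1
    have hl : l < (pvP ts).length := by omega
    obtain ⟨t, ht, htag⟩ := pvP_tag ts (List.getElem_mem hl)
    have htake : ((pvP ts).take (l + 1)).reverse
        = (pvP ts)[l] :: ((pvP ts).take l).reverse := by
      rw [List.take_succ, List.getElem?_eq_getElem hl]
      simp
    rw [htake]
    rw [show pvSweep ((pvP ts)[l] :: ((pvP ts).take l).reverse) (pvSeen ts (l + 1)) ((pvMiss ts (l + 1) : Int)) (pvBestO ts (l + 1))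
        = (let cur := (PySem.List.pyGet? (pvSeen ts (l + 1)) ((pvP ts)[l].2)).getD none
           let missing' := if cur.isNone then (pvMiss ts (l + 1) : Int) - 1 else (pvMiss ts (l + 1) : Int)
           let seen' := (pvSeen ts (l + 1)).set ((pvP ts)[l].2).toNat (some ((pvP ts)[l].1))
           let best' := if missing' == 0 then
               let d := pvMaxSeen seen' - (pvP ts)[l].1
               match pvBestO ts (l + 1) with
               | none => some d
               | some b => some (if d < b then d else b)
             else pvBestO ts (l + 1)
           pvSweep (((pvP ts).take l).reverse) seen' missing' best') from rfl]
    dsimp only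
    rw [htag, pvSeen_get ts (l + 1) ht, show ((t : Int)).toNat = t from Int.toNat_natCast t]
    rw [pvSeen_set ts hs hl ht htag]
    have hmiss := pvMiss_step ts hs hl ht htag
    have htcur : pvCnt ts t l < pvLen ts t := (pvP_cursor ts hs t ht hl htag).1
    have hmiss' : (if (if pvCnt ts t (l + 1) < pvLen ts t then some (pvPtr ts t (l + 1)) else none).isNone
        then (pvMiss ts (l + 1) : Int) - 1 else (pvMiss ts (l + 1) : Int)) = (pvMiss ts l : Int) := by
      by_cases hsat : pvCnt ts t (l + 1) < pvLen ts t
      · rw [if_pos hsat] at hmiss ⊢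
        simp only [Option.isNone_some, Bool.false_eq_true, if_false]
        omega
      · rw [if_neg hsat] at hmiss ⊢
        simp only [Option.isNone_none, if_true]
        omega
    rw [hmiss']
    have hzero : (((pvMiss ts l : Int)) == 0) = (decide (l ≤ pvBrk ts)) := by
      by_cases hcov : pvCov ts l = true
      · rw [show (decide (l ≤ pvBrk ts)) = true from by simpa using (pvLe_brk_iff ts hs hts hne l).mpr hcov]
        rw [beq_iff_eq]
        exact_mod_cast (pvMiss_zero_iff ts l).mpr hcov
      · rw [show (decide (l ≤ pvBrk ts)) = false from by
          simpa using fun hc => hcov ((pvLe_brk_iff ts hs hts hne l).mp hc)]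
        rw [beq_eq_false_iff_ne]
        intro hc
        exact hcov ((pvMiss_zero_iff ts l).mp (by exact_mod_cast hc))
    rw [hzero]
    have hbest : (if (decide (l ≤ pvBrk ts)) = true then
        (match pvBestO ts (l + 1) with
         | none => some (pvMaxSeen (pvSeen ts l) - (pvP ts)[l].1)
         | some b => some (if pvMaxSeen (pvSeen ts l) - (pvP ts)[l].1 < b then pvMaxSeen (pvSeen ts l) - (pvP ts)[l].1 else b))
        else pvBestO ts (l + 1)) = pvBestO ts l := by
      by_cases hcovle : l ≤ pvBrk ts
      · rw [if_pos (by simpa using hcovle)]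
        have hcov : pvCov ts l = true := (pvLe_brk_iff ts hs hts hne l).mp hcovle
        have hd : pvMaxSeen (pvSeen ts l) - (pvP ts)[l].1 = pvWin ts l := by
          rw [pvMaxSeen_cov ts hts hcov, pvWin_eq ts hl]
        rcases Nat.lt_or_ge l (pvBrk ts) with hlt | hge
        · have hb1 : pvBestO ts (l + 1) = some (pvWinMin ts (l + 1)) := by
            unfold pvBestO; rw [if_pos (by omega)]
          rw [hb1]
          unfold pvBestO
          rw [if_pos hcovle, pvWinMin_step ts hlt, hd]
          dsimp only
          congr 1
          by_cases hc : pvWin ts l < pvWinMin ts (l + 1)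
          · rw [if_pos hc, min_eq_left (le_of_lt hc)]
          · rw [if_neg hc, min_eq_right (not_lt.mp hc)]
        · have hlB : l = pvBrk ts := by omega
          have hb1 : pvBestO ts (l + 1) = none := by
            unfold pvBestO; rw [if_neg (by omega)]
          rw [hb1, hd]
          dsimp only
          unfold pvBestO
          rw [if_pos hcovle, hlB, pvWinMin_last]
      · rw [if_neg (by simpa using hcovle)]
        unfold pvBestO
        rw [if_neg hcovle, if_neg (by omega)]
    rw [hbest]
    exact ih (by omega)

-- ===== Pre_ helpers (copied from the main file) =====
lemma pvTeamMin_spec (team : List Int) (h : team ≠ []) :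
    pvTeamMin team ∈ team ∧ ∀ x ∈ team, pvTeamMin team ≤ x := by
  unfold pvTeamMin
  cases team with
  | nil => exact absurd rfl h
  | cons a t =>
    simp only [List.headD_cons, List.foldl_cons, min_self]
    constructor
    · rcases PySem.List.foldl_min_mem t a with h | h
      · rw [h]; exact List.mem_cons_self
      · exact List.mem_cons_of_mem _ h
    · intro x hx
      rcases List.mem_cons.mp hx with rfl | hx
      · exact (PySem.List.foldl_min_le t x).1
      · exact (PySem.List.foldl_min_le t a).2 x hx

lemma pvTeamMax_spec (team : List Int) (h : team ≠ []) :
    pvTeamMax team ∈ team ∧ ∀ x ∈ team, x ≤ pvTeamMax team := by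
  unfold pvTeamMax
  cases team with
  | nil => exact absurd rfl h
  | cons a t =>
    simp only [List.headD_cons, List.foldl_cons, max_self]
    constructor
    · rcases PySem.List.foldl_max_mem t a with h | h
      · rw [h]; exact List.mem_cons_self
      · exact List.mem_cons_of_mem _ h
    · intro x hx
      rcases List.mem_cons.mp hx with rfl | hx
      · exact (PySem.List.le_foldl_max t x).1
      · exact (PySem.List.le_foldl_max t a).2 x hx

-- the sorted list of a nonempty team starts with its minimum …
lemma pvSorted_head (team : List Int) (h : team ≠ []) :
    (PySem.List.sorted team (fun v => v) false).getD 0 0 = pvTeamMin team := by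
  have hperm := PySem.List.sorted_perm team (fun v => v) false
  have hlen : 0 < (PySem.List.sorted team (fun v => v) false).length := by
    rw [PySem.List.length_sorted]; exact List.length_pos_iff.mpr h
  rw [List.getD_eq_getElem _ _ hlen]
  have hmem : (PySem.List.sorted team (fun v => v) false)[0] ∈ team :=
    hperm.mem_iff.mp (List.getElem_mem hlen)
  have hmin := pvTeamMin_spec team h
  apply le_antisymm
  · obtain ⟨j, hj, heq⟩ := List.mem_iff_getElem.mp (hperm.mem_iff.mpr hmin.1)
    rw [← heq]
    exact PySem.List.sorted_id_getElem_mono team (Nat.zero_le j) hj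
  · exact hmin.2 _ hmem

-- … and ends with its maximum
lemma pvSorted_last (team : List Int) (h : team ≠ []) :
    (PySem.List.sorted team (fun v => v) false).getD (team.length - 1) 0 = pvTeamMax team := by
  have hperm := PySem.List.sorted_perm team (fun v => v) false
  have hlen0 : 0 < team.length := List.length_pos_iff.mpr h
  have hlen : team.length - 1 < (PySem.List.sorted team (fun v => v) false).length := by
    rw [PySem.List.length_sorted]; omega
  rw [List.getD_eq_getElem _ _ hlen]
  have hmem : (PySem.List.sorted team (fun v => v) false)[team.length - 1] ∈ team :=
    hperm.mem_iff.mp (List.getElem_mem hlen)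
  have hmax := pvTeamMax_spec team h
  apply le_antisymm
  · exact hmax.2 _ hmem
  · obtain ⟨j, hj, heq⟩ := List.mem_iff_getElem.mp (hperm.mem_iff.mpr hmax.1)
    rw [← heq]
    apply PySem.List.sorted_id_getElem_mono team _ hlen
    rw [PySem.List.length_sorted] at hj
    omega

-- ===== connecting the input to the core objects =====
def pvTeams (n k : Int) (skills : List (List Int)) : List (List Int) :=
  (List.range n.toNat).map (fun t =>
    (PySem.List.sorted (skills.getD t []) (fun v => v) false).take k.toNat)

lemma pvTeams_length (n k : Int) (skills : List (List Int)) :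
    (pvTeams n k skills).length = n.toNat := by simp [pvTeams]

lemma pvTeams_getD (n k : Int) (skills : List (List Int)) {t : Nat} (ht : t < n.toNat) :
    (pvTeams n k skills).getD t []
      = (PySem.List.sorted (skills.getD t []) (fun v => v) false).take k.toNat := by
  unfold pvTeams
  rw [List.getD_eq_getElem _ _ (by simpa using ht), List.getElem_map, List.getElem_range]

lemma pvSkills_mem (n : Int) (skills : List (List Int)) {t : Nat} (ht : t < skills.length) :
    skills.getD t [] ∈ skills := by
  rw [List.getD_eq_getElem _ _ ht]; exact List.getElem_mem ht

lemma pvPre_good (n k : Int) (skills : List (List Int)) (hpre : Pre_solve n k skills) :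
    pvGood k.toNat (pvTeams n k skills) := by
  obtain ⟨hn, hk, hnlen, hne, hsur, hfull, hshort⟩ := hpre
  set K := k.toNat with hK
  set ts := pvTeams n k skills with hts
  have hkk : ((K : Nat) : Int) = k := Int.toNat_of_nonneg (by omega)
  have hN : 0 < n.toNat := by omega
  have hNlen : n.toNat ≤ skills.length := by omega
  have hKpos : 0 < K := by omega
  have hlen : ts.length = n.toNat := pvTeams_length n k skills
  have hteam : ∀ t, t < n.toNat → ts.getD t []
      = (PySem.List.sorted (skills.getD t []) (fun v => v) false).take K :=
    fun t ht => pvTeams_getD n k skills ht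
  have hsortne : ∀ t, t < n.toNat →
      PySem.List.sorted (skills.getD t []) (fun v => v) false ≠ [] := by
    intro t ht hnil
    exact hne (skills.getD t []) (pvSkills_mem n skills (by omega))
      ((PySem.List.sorted_eq_nil_iff _ _ _).mp hnil)
  have hLen : ∀ t, t < n.toNat → pvLen ts t = min K (skills.getD t []).length := by
    intro t ht
    unfold pvLen
    rw [hteam t ht, List.length_take, PySem.List.length_sorted]
  unfold pvGood
  refine ⟨hKpos, ?_, ?_, ?_⟩
  · intro hnil; rw [hnil] at hlen; simp at hlen; omega
  · intro team hmem
    rw [hts] at hmem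
    unfold pvTeams at hmem
    rw [List.mem_map] at hmem
    obtain ⟨t, htr, rfl⟩ := hmem
    have ht := List.mem_range.mp htr
    refine ⟨?_, ?_, ?_⟩
    · intro hnil
      rw [List.take_eq_nil_iff] at hnil
      rcases hnil with h | h
      · omega
      · exact hsortne t ht h
    · exact List.length_take_le _ _
    · exact List.Pairwise.sublist (List.take_sublist _ _)
        (PySem.List.sorted_pairwise _ _)
  · intro t ht hlt
    rw [hlen] at ht
    have hlent := hLen t ht
    have hshortlen : (skills.getD t []).length < K := by omega
    have hlenIntLt : ((skills.getD t []).length : Int) < k := by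
      rw [← hkk]; exact_mod_cast hshortlen
    obtain ⟨u, hu, hule, hlex⟩ := hshort t ht hlenIntLt
    have hulen : K ≤ (skills.getD u []).length := by
      rw [← hkk] at hule; exact_mod_cast hule
    have heu : (ts.getD u []).getD (K - 1) 0 = pvKth (skills.getD u []) k := by
      rw [hteam u hu]
      have hb : K - 1 < ((PySem.List.sorted (skills.getD u []) (fun v => v) false).take K).length := by
        rw [List.length_take, PySem.List.length_sorted]; omega
      rw [List.getD_eq_getElem _ _ hb, List.getElem_take]
      unfold pvKth
      rw [← hK]
      exact (List.getD_eq_getElem _ _ (by rw [PySem.List.length_sorted]; omega)).symm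
    have het : (ts.getD t []).getD (pvLen ts t - 1) 0 = pvTeamMax (skills.getD t []) := by
      rw [hteam t ht, List.take_of_length_le (by rw [PySem.List.length_sorted]; omega)]
      have : pvLen ts t = (skills.getD t []).length := by omega
      rw [this]
      exact pvSorted_last _ (hne _ (pvSkills_mem n skills (by omega)))
    refine ⟨u, by omega, by rw [hLen u hu]; omega, ?_⟩
    rw [heu, het]
    exact hlex

-- cursors at the start are the team minima
lemma pvPtr_zero (n k : Int) (skills : List (List Int)) (hk : 1 ≤ k)
    {t : Nat} (ht : t < n.toNat) (hne : skills.getD t [] ≠ []) :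
    pvPtr (pvTeams n k skills) t 0 = pvTeamMin (skills.getD t []) := by
  unfold pvPtr
  rw [pvCnt_zero, pvTeams_getD n k skills ht]
  rw [← pvSorted_head (skills.getD t []) hne]
  have hlen : 0 < (PySem.List.sorted (skills.getD t []) (fun v => v) false).length := by
    rw [PySem.List.length_sorted]
    exact List.length_pos_iff.mpr hne
  have hlen' : 0 < ((PySem.List.sorted (skills.getD t []) (fun v => v) false).take k.toNat).length := by
    rw [List.length_take]
    omega
  rw [List.getD_eq_getElem _ _ hlen', List.getD_eq_getElem _ _ hlen, List.getElem_take]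

-- the total number of pairs is at most n*k
lemma pvP_len_le (K : Nat) (ts : List (List Int)) (hlen : ∀ team ∈ ts, team.length ≤ K) :
    (pvP ts).length ≤ ts.length * K := by
  rw [(pvP_perm ts).length_eq]
  unfold pvFlat
  rw [List.length_flatMap]
  have hb : ∀ x ∈ (List.range ts.length).map
      (fun t => ((ts.getD t []).map (fun v => (v, (t : Int)))).length), x ≤ K := by
    intro x hx
    rw [List.mem_map] at hx
    obtain ⟨t, htr, rfl⟩ := hx
    rw [List.length_map]
    rcases Nat.lt_or_ge t ts.length with h | h
    · exact hlen _ (pvSkills_mem (0 : Int) ts h)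
    · rw [List.getD_eq_default _ _ (by simpa using h)]
      simp
  calc ((List.range ts.length).map _).sum
      ≤ ((List.range ts.length).map (fun t => ((ts.getD t []).map (fun v => (v, (t : Int)))).length)).length • K :=
        List.sum_le_card_nsmul _ _ hb
    _ = ts.length * K := by simp [smul_eq_mul]

lemma pvSeen_full (ts : List (List Int)) (hs : pvTS ts) :
    pvSeen ts ((pvP ts).length) = List.replicate ts.length none := by
  unfold pvSeen
  rw [List.eq_replicate_iff]
  refine ⟨by simp, ?_⟩
  intro b hb
  rw [List.mem_map] at hb
  obtain ⟨t, htr, rfl⟩ := hb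
  rw [if_neg]
  rw [pvCnt_total ts hs t (List.mem_range.mp htr) (le_refl _)]
  omega

lemma pvMiss_full (ts : List (List Int)) (hs : pvTS ts) :
    pvMiss ts ((pvP ts).length) = ts.length := by
  unfold pvMiss
  rw [show (List.range ts.length).filter (fun t => decide (pvLen ts t ≤ pvCnt ts t (pvP ts).length))
      = List.range ts.length from List.filter_eq_self.mpr ?_]
  · simp
  · intro t htr
    rw [pvCnt_total ts hs t (List.mem_range.mp htr) (le_refl _)]
    simp

lemma pvAlt_eq (n k : Int) (skills : List (List Int)) (hpre : Pre_solve n k skills) :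
    solve_alt n k skills = pvWinMin (pvTeams n k skills) 0 := by
  obtain ⟨hn, hk, hnlen, hne, hsur, hfull, hshort⟩ := hpre
  have hg : pvGood k.toNat (pvTeams n k skills) :=
    pvPre_good n k skills ⟨hn, hk, hnlen, hne, hsur, hfull, hshort⟩
  set ts := pvTeams n k skills with hts
  have hs := pvGood_ts _ ts hg
  have htsne := hg.2.1
  have hteamne := pvGood_nonempty _ ts hg
  have hNlen : n.toNat ≤ skills.length := by omega
  have hflat : ((PySem.List.pyRange 0 n 1).flatMap (fun t =>
      (PySem.List.slice
          (PySem.List.sorted ((PySem.List.pyGet? skills t).getD []) (fun v => v) false)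
          none (some k)).map (fun v => (v, t)))) = pvFlat ts := by
    conv_lhs => rw [show n = ((n.toNat : Nat) : Int) from (Int.toNat_of_nonneg (by omega)).symm]
    rw [PySem.List.pyRange_zero_natCast, List.flatMap_map]
    unfold pvFlat
    rw [show ts.length = n.toNat from pvTeams_length n k skills]
    apply List.flatMap_congr
    intro t htr
    have ht := List.mem_range.mp htr
    congr 1
    · rw [PySem.List.slice_to _ (by omega), PySem.List.pyGet?_natCast,
        pvTeams_getD n k skills ht, ← List.getD_eq_getElem?_getD]
  rw [show solve_alt n k skills
      = (match pvSweep (PySem.List.sorted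
            ((PySem.List.pyRange 0 n 1).flatMap (fun t =>
              (PySem.List.slice
                  (PySem.List.sorted ((PySem.List.pyGet? skills t).getD []) (fun v => v) false)
                  none (some k)).map (fun v => (v, t))))
            (fun p => p.1) false).reverse (List.replicate n.toNat none) n none with
         | some best => best
         | none => 0) from rfl]
  rw [hflat]
  rw [show List.replicate n.toNat (none : Option Int) = pvSeen ts ((pvP ts).length) by
    rw [pvSeen_full ts hs, pvTeams_length]]
  rw [show n = ((pvMiss ts ((pvP ts).length) : Nat) : Int) by
    rw [pvMiss_full ts hs, pvTeams_length]
    exact (Int.toNat_of_nonneg (by omega)).symm]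
  rw [show (none : Option Int) = pvBestO ts ((pvP ts).length) by
    unfold pvBestO
    rw [if_neg (by have := pvBrk_lt ts hs htsne hteamne; omega)]]
  rw [show (PySem.List.sorted (pvFlat ts) (fun p => p.1) false).reverse
      = ((pvP ts).take ((pvP ts).length)).reverse by rw [List.take_length]; rfl]
  rw [pvSweep_eq ts hs htsne hteamne ((pvP ts).length) (le_refl _)]
  unfold pvBestO
  rw [if_pos (Nat.zero_le _)]

lemma pvHead_min (team : List Int) (h : team ≠ []) :
    ((PySem.List.pyGet? (PySem.List.sorted team (fun v => v) false) 0).getD 0) = pvTeamMin team := by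
  rw [PySem.List.pyGet?_zero, ← List.getD_eq_getElem?_getD]
  exact pvSorted_head team h

lemma pvBase_eq (n k : Int) (skills : List (List Int)) (hn : 1 ≤ n)
    (hk : 1 ≤ k) (hnlen : n ≤ (skills.length : Int)) (hne : ∀ team ∈ skills, team ≠ []) :
    pvBaseMax n skills = pvMaxPtr (pvTeams n k skills) 0 := by
  unfold pvBaseMax pvMaxPtr
  rw [pvTeams_length]
  have hcongr : ∀ t ∈ List.range n.toNat,
      pvPtr (pvTeams n k skills) t 0 = pvTeamMin (skills.getD t []) := by
    intro t htr
    have ht := List.mem_range.mp htr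
    exact pvPtr_zero n k skills hk ht
      (hne _ (pvSkills_mem n skills (by omega)))
  rw [List.map_congr_left hcongr]
  congr 1
  rw [pvPtr_zero n k skills hk (by omega) (hne _ (pvSkills_mem n skills (by omega)))]

lemma pvA_eq (n k : Int) (skills : List (List Int)) (hpre : Pre_solve n k skills) :
    solve n k skills = pvWinMin (pvTeams n k skills) 0 := by
  obtain ⟨hn, hk, hnlen, hne, hsur, hfull, hshort⟩ := hpre
  have hg : pvGood k.toNat (pvTeams n k skills) :=
    pvPre_good n k skills ⟨hn, hk, hnlen, hne, hsur, hfull, hshort⟩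
  set K := k.toNat with hK
  set ts := pvTeams n k skills with hts
  have hs := pvGood_ts _ ts hg
  have htsne := hg.2.1
  have hteamne := pvGood_nonempty _ ts hg
  have hNlen : n.toNat ≤ skills.length := by omega
  have hskne : skills ≠ [] := by
    intro h; rw [h] at hNlen; simp at hNlen; omega
  -- the list of team minima
  have hmins : (skills.map (fun team => PySem.List.sorted team (fun v => v) false)).map
        (fun team => (PySem.List.pyGet? team 0).getD 0)
      = skills.map (fun team => pvTeamMin team) := by
    rw [List.map_map]
    apply List.map_congr_left
    intro team hmem
    exact pvHead_min team (hne team hmem)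
  rw [show solve n k skills
      = (match PySem.List.max? ((skills.map (fun team => PySem.List.sorted team (fun v => v) false)).map
            (fun team => (PySem.List.pyGet? team 0).getD 0)) (fun v => v) with
         | none => 0
         | some cm =>
            pvSolveLoop (skills.map (fun team => PySem.List.sorted team (fun v => v) false)) k
              (n.toNat * k.toNat + 1)
              ((PySem.List.pyRange 0 n 1).map (fun i =>
                (((PySem.List.pyGet? (skills.map (fun team => PySem.List.sorted team (fun v => v) false)) i).bind
                    (fun team => PySem.List.pyGet? team 0)).getD 0, i)))
              (List.replicate n.toNat 0) none cm) from rfl]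
  rw [hmins]
  cases hmax : PySem.List.max? (skills.map (fun team => pvTeamMin team)) (fun v => v) with
  | none =>
    rw [PySem.List.max?_eq_none_iff] at hmax
    rw [List.map_eq_nil_iff] at hmax
    exact absurd hmax hskne
  | some cm =>
    have hcm : cm = pvMaxPtr ts 0 := by
      apply le_antisymm
      · obtain ⟨j, hj, hjv⟩ := List.mem_iff_getElem.mp (PySem.List.max?_mem hmax)
        rw [List.length_map] at hj
        have hjv' : pvTeamMin (skills.getD j []) = cm := by
          rw [← hjv, List.getElem_map, List.getD_eq_getElem _ _ hj]
        rcases Nat.lt_or_ge j n.toNat with hjn | hjn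
        · rw [← hjv', ← pvPtr_zero n k skills hk hjn (hne _ (pvSkills_mem n skills hj))]
          exact pvMaxPtr_ge ts 0 (by rw [pvTeams_length]; exact hjn)
        · rw [← hjv']
          calc pvTeamMin (skills.getD j []) ≤ pvBaseMax n skills := hsur j hj hjn
            _ = pvMaxPtr ts 0 := pvBase_eq n k skills hn hk hnlen hne
      · obtain ⟨t, ht, hv⟩ := pvMaxPtr_mem ts 0 htsne
        rw [hv]
        have htn : t < n.toNat := by rw [pvTeams_length] at ht; exact ht
        rw [pvPtr_zero n k skills hk htn (hne _ (pvSkills_mem n skills (by omega)))]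
        exact PySem.List.max?_isMax hmax _
          (List.mem_map.mpr ⟨skills.getD t [], pvSkills_mem n skills (by omega), rfl⟩)
    -- the initial heap
    have hheap : ((PySem.List.pyRange 0 n 1).map (fun i =>
        (((PySem.List.pyGet? (skills.map (fun team => PySem.List.sorted team (fun v => v) false)) i).bind
            (fun team => PySem.List.pyGet? team 0)).getD 0, i)))
        = pvPairs ts 0 := by
      conv_lhs => rw [show n = ((n.toNat : Nat) : Int) from (Int.toNat_of_nonneg (by omega)).symm]
      rw [PySem.List.pyRange_zero_natCast, List.map_map]
      unfold pvPairs
      rw [show ts.length = n.toNat from pvTeams_length n k skills]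
      apply List.map_congr_left
      intro t htr
      have ht := List.mem_range.mp htr
      have htlen : t < skills.length := by omega
      simp only [Function.comp_apply]
      congr 1
      rw [PySem.List.pyGet?_natCast, List.getElem?_map, List.getElem?_eq_getElem htlen]
      simp only [Option.map_some, Option.bind_some]
      rw [show skills[t] = skills.getD t [] from (List.getD_eq_getElem _ _ htlen).symm]
      rw [pvHead_min (skills.getD t []) (hne _ (pvSkills_mem n skills htlen))]
      exact (pvPtr_zero n k skills hk ht (hne _ (pvSkills_mem n skills htlen))).symm
    -- the initial indices
    have hidx : (List.replicate n.toNat (0 : Int))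
        = (List.range ts.length).map (fun u => (pvCnt ts u 0 : Int)) := by
      symm
      rw [List.eq_replicate_iff]
      refine ⟨by rw [List.length_map, List.length_range, pvTeams_length], ?_⟩
      intro b hb
      rw [List.mem_map] at hb
      obtain ⟨u, -, rfl⟩ := hb
      rw [pvCnt_zero]
      rfl
    -- the connection between A's sorted teams and the truncated teams
    have hconn : ∀ t, t < ts.length → ∃ full : List Int,
        PySem.List.pyGet? (skills.map (fun team => PySem.List.sorted team (fun v => v) false)) (t : Int) = some full
          ∧ (ts.getD t []).IsPrefix full := by
      intro t ht
      have htn : t < n.toNat := by rw [pvTeams_length] at ht; exact ht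
      have htlen : t < skills.length := by omega
      refine ⟨PySem.List.sorted (skills.getD t []) (fun v => v) false, ?_, ?_⟩
      · rw [PySem.List.pyGet?_natCast, List.getElem?_map, List.getElem?_eq_getElem htlen]
        simp only [Option.map_some]
        rw [show skills[t] = skills.getD t [] from (List.getD_eq_getElem _ _ htlen).symm]
      · rw [pvTeams_getD n k skills htn]
        exact List.take_prefix _ _
    have hfuel : pvBrk ts < n.toNat * k.toNat + 1 := by
      have h1 := pvBrk_lt ts hs htsne hteamne
      have h2 := pvP_len_le K ts (fun team hm => ((hg.2.2.1 team hm).2.1))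
      rw [pvTeams_length] at h2
      rw [← hK]
      omega
    rw [hheap, hidx, hcm]
    dsimp only
    rw [pvLoop_eq K ts _ k hg (Int.toNat_of_nonneg (by omega)).symm hconn
      (pvBrk ts) 0 _ none _ (by omega) (List.Perm.refl _) hfuel]
    rfl

-- ===== VERDICT (by name: the statement is the Claim_ definition above) =====
theorem solve_spec : Claim_equal_solve := by
  intro n k skills _ hpre
  unfold Spec_solve
  rw [pvA_eq n k skills hpre, pvAlt_eq n k skills hpre]
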